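-- pv_equiv track=rewrite | github.com/ClNo/flask-squirrel | flask_squirrel/tools/initial_customview_translation.py | guess_referenced_name
-- ===== SOURCE A (Python) =====
-- def guess_referenced_name(db_spec, ref_table_name):
--     if ref_table_name not in db_spec:
--         return []
--
--     table_spec = db_spec[ref_table_name]['columns']
--
--     # try to find a column with the string 'name' in it
--     luckyshot_name_list = [col_spec for col_spec in table_spec if 'name' in col_spec['name']]
--     if luckyshot_name_list:
--         return ['{0}.{1}'.format(ref_table_name, col_spec['name']) for col_spec in luckyshot_name_list]
--
--     # no column with string 'name' found, take the first two (?) string columns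
--     string_col_list = [col_spec for col_spec in table_spec if col_spec['type'] == 'string']
--     if string_col_list:
--         return ['{0}.{1}'.format(ref_table_name, col_spec['name']) for col_spec in string_col_list[:2]]  # max 2
--
--     # else: no string column found -> do not return a column here
--     return []
-- ===== SOURCE B (Python) =====
-- def guess_referenced_name(db_spec, ref_table_name):
--     if ref_table_name not in db_spec:
--         return []
--
--     # rank every column by priority: 0 = has 'name' in its name, 1 = string-typed, 2 = other
--     def rank(col_spec):
--         if 'name' in col_spec['name']:
--             return 0
--         if col_spec.get('type') == 'string':
--             return 1
--         return 2
--
--     # stable sort by rank, then emit the leading best-rank group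
--     ranked = sorted(db_spec[ref_table_name]['columns'], key=rank)
--     if not ranked or rank(ranked[0]) == 2:
--         return []
--     best = rank(ranked[0])
--     out = []
--     for col_spec in ranked:
--         if rank(col_spec) != best:
--             break
--         out.append('{0}.{1}'.format(ref_table_name, col_spec['name']))
--     return out if best == 0 else out[:2]
-- ===== Notes on version B (the rewrite author's own statement) =====
-- stated objective: alternative
-- what changed: Replaces A's two sequential filter comprehensions with a priority-rank stable sort (rank 0: name-columns, 1: string-columns, 2: other) followed by one scan that emits the leading best-rank group (truncated to 2 for rank 1); Pre_ only excludes inputs where A raises KeyError (missing 'columns'/'name' keys, or a missing 'type' key when no name-column exists).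
import Mathlib
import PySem

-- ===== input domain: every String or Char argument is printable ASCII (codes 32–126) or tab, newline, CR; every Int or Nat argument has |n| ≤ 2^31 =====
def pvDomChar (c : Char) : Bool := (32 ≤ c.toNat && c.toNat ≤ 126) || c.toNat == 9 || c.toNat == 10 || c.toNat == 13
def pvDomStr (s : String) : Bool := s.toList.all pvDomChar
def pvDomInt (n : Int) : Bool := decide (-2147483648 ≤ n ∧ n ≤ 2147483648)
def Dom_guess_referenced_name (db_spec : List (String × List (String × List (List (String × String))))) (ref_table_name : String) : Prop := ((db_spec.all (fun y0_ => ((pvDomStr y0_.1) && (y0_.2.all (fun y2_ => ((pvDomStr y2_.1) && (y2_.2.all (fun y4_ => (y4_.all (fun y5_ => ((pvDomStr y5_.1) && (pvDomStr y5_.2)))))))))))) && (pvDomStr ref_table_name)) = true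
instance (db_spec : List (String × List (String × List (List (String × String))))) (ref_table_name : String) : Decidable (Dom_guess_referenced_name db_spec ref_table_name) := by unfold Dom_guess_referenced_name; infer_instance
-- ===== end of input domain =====

-- B replaces A's two sequential filter passes with a priority-rank stable sort plus one
-- scan emitting the leading best-rank group (objective: alternative algorithm, not faster).

-- ===== PORT A =====
-- col_spec['name']; the KeyError case (key absent) is excluded by Pre_, so the default "" is never read there
def pvColNameA (c : List (String × String)) : String := PySem.Dict.getD ⟨c⟩ "name" ""

-- '{0}.{1}'.format(t, n)
def pvFmtA (t n : String) : String := PySem.Str.join "." [t, n]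

def guess_referenced_name (db_spec : List (String × List (String × List (List (String × String))))) (ref_table_name : String) : List String :=
  if (PySem.Dict.get? ⟨db_spec⟩ ref_table_name).isNone then []
  else
    -- db_spec[ref_table_name]['columns']; both KeyErrors are handled by the guard / Pre_
    let table_spec := PySem.Dict.getD ⟨PySem.Dict.getD ⟨db_spec⟩ ref_table_name []⟩ "columns" []
    let luckyshot_name_list := table_spec.filter (fun c => PySem.Str.isIn "name" (pvColNameA c))
    if luckyshot_name_list ≠ [] then
      luckyshot_name_list.map (fun c => pvFmtA ref_table_name (pvColNameA c))
    else
      let string_col_list := table_spec.filter (fun c => PySem.Dict.getD ⟨c⟩ "type" "" == "string")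
      if string_col_list ≠ [] then
        -- string_col_list[:2] is List.take 2 (nonnegative upper slice)
        (string_col_list.take 2).map (fun c => pvFmtA ref_table_name (pvColNameA c))
      else []

-- ===== PORT B =====
-- col_spec['name'] (KeyError excluded by Pre_)
def pvColNameB (c : List (String × String)) : String := PySem.Dict.getD ⟨c⟩ "name" ""

-- '{0}.{1}'.format(t, n)
def pvFmtB (t n : String) : String := PySem.Str.join "." [t, n]

-- rank(col_spec): 0 if 'name' in col_spec['name'], 1 if col_spec.get('type') == 'string', else 2
def pvRank (c : List (String × String)) : Int :=
  if PySem.Str.isIn "name" (pvColNameB c) then 0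
  else if PySem.Dict.get? ⟨c⟩ "type" == some "string" then 1
  else 2

-- the 'for col_spec in ranked: if rank != best: break; out.append(fmt)' loop
def pvLead (t : String) (best : Int) : List (List (String × String)) → List String
  | [] => []
  | c :: cs => if pvRank c == best then pvFmtB t (pvColNameB c) :: pvLead t best cs else []

def guess_referenced_name_alt (db_spec : List (String × List (String × List (List (String × String))))) (ref_table_name : String) : List String :=
  if (PySem.Dict.get? ⟨db_spec⟩ ref_table_name).isNone then []
  else
    -- ranked = sorted(db_spec[ref_table_name]['columns'], key=rank)  (stable)
    let ranked := PySem.List.sorted (PySem.Dict.getD ⟨PySem.Dict.getD ⟨db_spec⟩ ref_table_name []⟩ "columns" []) pvRank false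
    -- 'if not ranked or rank(ranked[0]) == 2: return []' — ranked[0] guarded by nonemptiness
    match ranked.head? with
    | none => []
    | some c0 =>
      if pvRank c0 == 2 then []
      else
        let best := pvRank c0
        let out := pvLead ref_table_name best ranked
        if best == 0 then out else out.take 2

-- ===== PRECONDITION & SPEC =====
-- Pre_ excludes exactly the inputs where Python A raises KeyError: the referenced table lacks a
-- 'columns' key, some column dict lacks a 'name' key, or (when no column name contains 'name')
-- some column dict lacks a 'type' key.
def Pre_guess_referenced_name (db_spec : List (String × List (String × List (List (String × String))))) (ref_table_name : String) : Prop :=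
  (PySem.Dict.get? ⟨db_spec⟩ ref_table_name).isSome = true →
    (PySem.Dict.get? ⟨PySem.Dict.getD ⟨db_spec⟩ ref_table_name []⟩ "columns").isSome = true ∧
    (∀ c ∈ PySem.Dict.getD ⟨PySem.Dict.getD ⟨db_spec⟩ ref_table_name []⟩ "columns" [], (PySem.Dict.get? ⟨c⟩ "name").isSome = true) ∧
    ((∀ c ∈ PySem.Dict.getD ⟨PySem.Dict.getD ⟨db_spec⟩ ref_table_name []⟩ "columns" [], ¬ PySem.Str.isIn "name" (PySem.Dict.getD ⟨c⟩ "name" "") = true) →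
      ∀ c ∈ PySem.Dict.getD ⟨PySem.Dict.getD ⟨db_spec⟩ ref_table_name []⟩ "columns" [], (PySem.Dict.get? ⟨c⟩ "type").isSome = true)

instance (db_spec : List (String × List (String × List (List (String × String))))) (ref_table_name : String) : Decidable (Pre_guess_referenced_name db_spec ref_table_name) := by unfold Pre_guess_referenced_name; infer_instance

def pvWitness_guess_referenced_name : (List (String × List (String × List (List (String × String))))) × String :=
  ([("t", [("columns", [[("name", "id"), ("type", "int")], [("name", "username"), ("type", "string")]])])], "t")

def Spec_guess_referenced_name (db_spec : List (String × List (String × List (List (String × String))))) (ref_table_name : String) (out : List String) : Prop := out = guess_referenced_name_alt db_spec ref_table_name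
instance (db_spec : List (String × List (String × List (List (String × String))))) (ref_table_name : String) (out : List String) : Decidable (Spec_guess_referenced_name db_spec ref_table_name out) := by unfold Spec_guess_referenced_name; infer_instance

-- ===== CLAIM (what is proved, stated in full; the proofs are below) =====
def Claim_equal_guess_referenced_name : Prop := ∀ (db_spec : List (String × List (String × List (List (String × String))))) (ref_table_name : String), Dom_guess_referenced_name db_spec ref_table_name → Pre_guess_referenced_name db_spec ref_table_name → Spec_guess_referenced_name db_spec ref_table_name (guess_referenced_name db_spec ref_table_name)

-- ===== LEMMAS AND PROOFS =====

-- inserting x past a prefix it does not go before, in front of a suffix it goes before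
theorem pvInsertBy_skip {α : Type} (before : α → α → Bool) (x : α) (l1 l2 : List α)
    (h1 : ∀ y ∈ l1, before x y = false) (h2 : ∀ y ∈ l2, before x y = true) :
    PySem.List.insertBy before x (l1 ++ l2) = l1 ++ x :: l2 := by
  induction l1 with
  | nil =>
    cases l2 with
    | nil => rfl
    | cons y ys => simp [PySem.List.insertBy, h2 y (by simp)]
  | cons z zs ih =>
    have hz : before x z = false := h1 z (by simp)
    simp only [List.cons_append, PySem.List.insertBy, hz]
    simp only [Bool.false_eq_true, if_false, List.cons.injEq, true_and]
    exact ih (fun y hy => h1 y (by simp [hy]))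

-- the stable insertion-sort fold with three rank buckets in the accumulator
theorem pvFoldl_ins3 {α : Type} (key : α → Int) (ts A0 A1 A2 : List α)
    (h0 : ∀ a ∈ A0, key a = 0) (h1 : ∀ a ∈ A1, key a = 1) (h2 : ∀ a ∈ A2, key a = 2)
    (hts : ∀ c ∈ ts, key c = 0 ∨ key c = 1 ∨ key c = 2) :
    ts.foldl (fun acc x => PySem.List.insertBy (fun a b => decide (key a < key b)) x acc) (A0 ++ A1 ++ A2)
      = (A0 ++ ts.filter (fun c => key c == 0)) ++ (A1 ++ ts.filter (fun c => key c == 1))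
          ++ (A2 ++ ts.filter (fun c => key c == 2)) := by
  induction ts generalizing A0 A1 A2 with
  | nil => simp
  | cons x xs ih =>
    have hxs : ∀ c ∈ xs, key c = 0 ∨ key c = 1 ∨ key c = 2 := fun c hc => hts c (by simp [hc])
    rcases hts x (by simp) with hx | hx | hx
    · have : PySem.List.insertBy (fun a b => decide (key a < key b)) x (A0 ++ A1 ++ A2)
          = (A0 ++ [x]) ++ A1 ++ A2 := by
        rw [List.append_assoc, pvInsertBy_skip _ x A0 (A1 ++ A2)
          (fun y hy => by simp [hx, h0 y hy])
          (fun y hy => by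
            rcases List.mem_append.mp hy with h | h
            · simp [hx, h1 y h]
            · simp [hx, h2 y h])]
        simp
      simp only [List.foldl_cons, this,
        ih (A0 ++ [x]) A1 A2
          (fun a ha => by rcases List.mem_append.mp ha with h | h; exact h0 a h; simp at h; simp [h, hx])
          h1 h2 hxs,
        List.filter_cons, hx]
      simp
    · have : PySem.List.insertBy (fun a b => decide (key a < key b)) x (A0 ++ A1 ++ A2)
          = A0 ++ (A1 ++ [x]) ++ A2 := by
        rw [show A0 ++ A1 ++ A2 = (A0 ++ A1) ++ A2 by simp,
          pvInsertBy_skip _ x (A0 ++ A1) A2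
          (fun y hy => by
            rcases List.mem_append.mp hy with h | h
            · simp [hx, h0 y h]
            · simp [hx, h1 y h])
          (fun y hy => by simp [hx, h2 y hy])]
        simp
      simp only [List.foldl_cons, this,
        ih A0 (A1 ++ [x]) A2 h0
          (fun a ha => by rcases List.mem_append.mp ha with h | h; exact h1 a h; simp at h; simp [h, hx])
          h2 hxs,
        List.filter_cons, hx]
      simp
    · have : PySem.List.insertBy (fun a b => decide (key a < key b)) x (A0 ++ A1 ++ A2)
          = A0 ++ A1 ++ (A2 ++ [x]) := by
        rw [PySem.List.insertBy_of_forall_not_before _ x (A0 ++ A1 ++ A2)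
          (fun y hy => by
            rcases List.mem_append.mp hy with h | h
            · rcases List.mem_append.mp h with h' | h'
              · simp [hx, h0 y h']
              · simp [hx, h1 y h']
            · simp [hx, h2 y h])]
        simp
      simp only [List.foldl_cons, this,
        ih A0 A1 (A2 ++ [x]) h0 h1
          (fun a ha => by rcases List.mem_append.mp ha with h | h; exact h2 a h; simp at h; simp [h, hx])
          hxs,
        List.filter_cons, hx]
      simp

-- stable sort by a three-valued rank is the concatenation of the three rank filters
theorem pvSorted3 {α : Type} (key : α → Int) (ts : List α)
    (hts : ∀ c ∈ ts, key c = 0 ∨ key c = 1 ∨ key c = 2) :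
    PySem.List.sorted ts key false
      = ts.filter (fun c => key c == 0) ++ ts.filter (fun c => key c == 1)
          ++ ts.filter (fun c => key c == 2) := by
  rw [PySem.List.sorted_eq_foldl_insertBy ts key]
  have := pvFoldl_ins3 key ts [] [] [] (by simp) (by simp) (by simp) hts
  simpa using this

-- pvRank takes only the values 0, 1, 2
theorem pvRank_cases (c : List (String × String)) : pvRank c = 0 ∨ pvRank c = 1 ∨ pvRank c = 2 := by
  unfold pvRank; split_ifs <;> simp

-- rank 0 is exactly A's 'name'-substring test
theorem pvRank0_iff (c : List (String × String)) :
    (pvRank c == 0) = PySem.Str.isIn "name" (pvColNameA c) := by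
  unfold pvRank pvColNameB pvColNameA
  split_ifs with h1 h2 <;> simp at h1 ⊢ <;> simp [h1]

-- A's 'type' test (getD with default "") agrees with B's (get? against some)
theorem pvType_test_eq (c : List (String × String)) :
    (PySem.Dict.get? ⟨c⟩ "type" == some "string") = (PySem.Dict.getD ⟨c⟩ "type" "" == "string") := by
  rw [PySem.Dict.getD_eq_get?_getD]
  cases h : PySem.Dict.get? (⟨c⟩ : PySem.Dict String String) "type" with
  | none => simp
  | some v => simp

-- the break-loop emits exactly the map over a leading block of constant rank
theorem pvLead_append (t : String) (best : Int) (l1 l2 : List (List (String × String)))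
    (h1 : ∀ c ∈ l1, pvRank c = best)
    (h2 : ∀ c cs, l2 = c :: cs → pvRank c ≠ best) :
    pvLead t best (l1 ++ l2) = l1.map (fun c => pvFmtB t (pvColNameB c)) := by
  induction l1 with
  | nil =>
    cases l2 with
    | nil => rfl
    | cons c cs => simp [pvLead, h2 c cs rfl]
  | cons z zs ih =>
    simp [pvLead, h1 z (by simp), ih (fun c hc => h1 c (by simp [hc]))]

-- ===== VERDICT (by name: the statement is the Claim_ definition above) =====
theorem guess_referenced_name_spec : Claim_equal_guess_referenced_name := by
  intro db_spec ref_table_name _ _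
  unfold Spec_guess_referenced_name guess_referenced_name guess_referenced_name_alt
  cases hd : (PySem.Dict.get? ⟨db_spec⟩ ref_table_name).isNone with
  | true => simp
  | false =>
    simp only [Bool.false_eq_true, if_false]
    set ts := PySem.Dict.getD ⟨PySem.Dict.getD ⟨db_spec⟩ ref_table_name []⟩ "columns" [] with hts
    rw [pvSorted3 pvRank ts (fun c _ => pvRank_cases c)]
    set F0 := ts.filter (fun c => pvRank c == 0) with hF0
    set F1 := ts.filter (fun c => pvRank c == 1) with hF1
    set F2 := ts.filter (fun c => pvRank c == 2) with hF2
    have hLucky : ts.filter (fun c => PySem.Str.isIn "name" (pvColNameA c)) = F0 := by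
      rw [hF0]; exact List.filter_congr (fun c _ => (pvRank0_iff c).symm)
    rw [hLucky]
    have hfmtBA : (fun c => pvFmtB ref_table_name (pvColNameB c)) = (fun c => pvFmtA ref_table_name (pvColNameA c)) := rfl
    cases hf0 : F0 with
    | cons c0 t0 =>
      -- name columns exist: best = 0, leading group is all of F0
      have hc0 : pvRank c0 = 0 := by
        have : c0 ∈ F0 := by rw [hf0]; simp
        have := List.of_mem_filter this; simpa using this
      rw [List.append_assoc]
      have hlead : pvLead ref_table_name 0 (F0 ++ (F1 ++ F2))
          = F0.map (fun c => pvFmtB ref_table_name (pvColNameB c)) := by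
        apply pvLead_append
        · intro c hc; have := List.of_mem_filter (hF0 ▸ hc); simpa using this
        · intro c cs hcs
          rcases List.mem_append.mp (show c ∈ F1 ++ F2 by rw [hcs]; simp) with h | h
          · have := List.of_mem_filter (hF1 ▸ h); simp at this; omega
          · have := List.of_mem_filter (hF2 ▸ h); simp at this; omega
      rw [hf0] at hlead
      simp only [List.cons_append, List.head?_cons, hc0]
      simp only [show ((0:Int) == 2) = false from rfl, show ((0:Int) == 0) = true from rfl,
        Bool.false_eq_true, if_false, if_true, ne_eq, reduceCtorEq, not_false_eq_true,
        List.map_cons]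
      rw [List.cons_append] at hlead
      rw [hlead]
      rfl
    | nil =>
      -- no name column: every column in ts fails the substring test
      have hNoName : ∀ c ∈ ts, ¬ (PySem.Str.isIn "name" (pvColNameA c) = true) := by
        intro c hc hcontra
        have : c ∈ F0 := by
          rw [hF0, List.mem_filter]; exact ⟨hc, by rw [pvRank0_iff]; exact hcontra⟩
        rw [hf0] at this; simp at this
      have hStr : ts.filter (fun c => PySem.Dict.getD ⟨c⟩ "type" "" == "string") = F1 := by
        rw [hF1]
        apply List.filter_congr
        intro c hc
        have hn : ¬ PySem.Str.isIn "name" (pvColNameB c) = true := hNoName c hc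
        rw [← pvType_test_eq]
        unfold pvRank
        rw [if_neg hn]
        split_ifs with h <;> simp [h]
      simp only [List.nil_append, List.map_nil, ne_eq, not_true_eq_false, if_false]
      rw [hStr]
      cases hf1 : F1 with
      | cons c1 t1 =>
        -- string columns exist: best = 1, leading group is F1, truncated to 2
        have hc1 : pvRank c1 = 1 := by
          have : c1 ∈ F1 := by rw [hf1]; simp
          have := List.of_mem_filter (hF1 ▸ this); simpa using this
        have hlead : pvLead ref_table_name 1 (F1 ++ F2)
            = F1.map (fun c => pvFmtB ref_table_name (pvColNameB c)) := by
          apply pvLead_append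
          · intro c hc; have := List.of_mem_filter (hF1 ▸ hc); simpa using this
          · intro c cs hcs
            have := List.of_mem_filter (hF2 ▸ (show c ∈ F2 by rw [hcs]; simp))
            simp at this; omega
        rw [hf1] at hlead
        simp only [List.cons_append, List.head?_cons, hc1]
        simp only [show ((1:Int) == 2) = false from rfl, show ((1:Int) == 0) = false from rfl,
          Bool.false_eq_true, if_false, reduceCtorEq, not_false_eq_true, if_true]
        rw [List.cons_append] at hlead
        rw [hlead, ← List.map_take]
        rfl
      | nil =>
        -- no string column either
        simp only [List.nil_append, not_true_eq_false, if_false]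
        cases hf2 : F2 with
        | nil => simp
        | cons c2 t2 =>
          have hc2 : pvRank c2 = 2 := by
            have : c2 ∈ F2 := by rw [hf2]; simp
            have := List.of_mem_filter (hF2 ▸ this); simpa using this
          simp [hc2]
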